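-- pv_equiv track=rewrite | github.com/Haynier/Lambda-Calculus-Reduction-Engine | TO_SUBMIT/parser.py | buildMain
-- ===== SOURCE A (Python) =====
-- def buildMain(functions, i):
--     if functions[i][0] == 'main':
--         if len(functions) != 1:
--             return 't)'
--         else:
--             return "t"
--     s = 'AP(LM(x' + str(i+1) + ','
--     e = buildMain(functions, i+1)
--     s += e + ',t' + str(i+1)
--     if i == 0:
--         s += ')'
--     else:
--         s += '))'
--     return s
-- ===== SOURCE B (Python) =====
-- def buildMain(functions, i):
--     # Iterative re-decomposition: collect prefix/suffix pieces in one advancing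
--     # scan, then assemble with join (instead of A's recursion with repeated
--     # string concatenation).
--     prefixes = []
--     suffixes = []
--     j = i
--     while functions[j][0] != 'main':
--         prefixes.append('AP(LM(x' + str(j + 1) + ',')
--         suffixes.append(',t' + str(j + 1) + (')' if j == 0 else '))'))
--         j += 1
--     base = 't' if len(functions) == 1 else 't)'
--     return ''.join(prefixes) + base + ''.join(reversed(suffixes))
-- ===== Notes on version B (the rewrite author's own statement) =====
-- stated objective: alternative
-- what changed: Replaces A's recursion that rebuilds the growing string at every level with a single iterative scan that collects prefix and suffix pieces in two lists and assembles the result once with join.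
import Mathlib
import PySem

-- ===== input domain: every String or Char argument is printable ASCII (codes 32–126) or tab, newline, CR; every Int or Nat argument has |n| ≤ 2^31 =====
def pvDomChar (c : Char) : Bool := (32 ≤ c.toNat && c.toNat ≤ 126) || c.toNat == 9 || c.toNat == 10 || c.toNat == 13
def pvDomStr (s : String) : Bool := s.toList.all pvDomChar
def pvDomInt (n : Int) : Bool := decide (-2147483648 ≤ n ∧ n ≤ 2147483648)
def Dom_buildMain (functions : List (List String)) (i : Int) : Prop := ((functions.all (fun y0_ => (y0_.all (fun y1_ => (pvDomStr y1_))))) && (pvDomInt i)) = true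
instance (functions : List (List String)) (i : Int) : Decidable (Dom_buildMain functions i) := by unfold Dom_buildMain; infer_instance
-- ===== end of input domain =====

-- B replaces A's recursion (quadratic string rebuilding) by one iterative scan that
-- collects prefix/suffix pieces and joins them once; equivalence proved on Pre_ (the
-- inputs where A returns instead of raising IndexError).

-- Termination helper (cited by the ports' decreasing_by): a successful Python index is < length.
theorem pv_lt_of_pyGet?_some {α : Type} {xs : List α} {j : Int} {x : α}
    (h : PySem.List.pyGet? xs j = some x) : j < xs.length := by
  by_contra hc
  have hnone : PySem.List.pyGet? xs j = none := by
    rw [PySem.List.pyGet?_eq_none_iff]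
    intro hr
    unfold PySem.Raise.InRange at hr
    omega
  simp [hnone] at h

-- ===== PORT A =====
def buildMain (functions : List (List String)) (i : Int) : String :=
  match h : PySem.List.pyGet? functions i with
  | none => ""          -- functions[i] raises IndexError (excluded by Pre_)
  | some row =>
    match PySem.List.pyGet? row 0 with
    | none => ""        -- functions[i][0] raises IndexError (excluded by Pre_)
    | some h0 =>
      if h0 = "main" then
        if functions.length ≠ 1 then "t)" else "t"
      else
        let s := "AP(LM(x" ++ PySem.Int.toStr (i + 1) ++ ","
        let e := buildMain functions (i + 1)
        s ++ e ++ ",t" ++ PySem.Int.toStr (i + 1) ++ (if i = 0 then ")" else "))")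
termination_by (functions.length - i).toNat
decreasing_by have := pv_lt_of_pyGet?_some h; omega

-- ===== PORT B =====
-- ''.join(l) ported by hand as a left fold over ++ with "" (exact for the empty separator).
def pvJoin (l : List String) : String := l.foldl (· ++ ·) ""

-- the while loop of Source B: advance j, appending one prefix and one suffix piece per step
def pvLoop (functions : List (List String)) (j : Int) (prefixes suffixes : List String) :
    List String × List String :=
  match h : PySem.List.pyGet? functions j with
  | none => (prefixes, suffixes)        -- IndexError in Python (excluded by Pre_)
  | some row =>
    match PySem.List.pyGet? row 0 with
    | none => (prefixes, suffixes)      -- IndexError in Python (excluded by Pre_)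
    | some h0 =>
      if h0 = "main" then (prefixes, suffixes)
      else
        pvLoop functions (j + 1)
          (prefixes ++ ["AP(LM(x" ++ PySem.Int.toStr (j + 1) ++ ","])
          (suffixes ++ [",t" ++ PySem.Int.toStr (j + 1) ++ (if j = 0 then ")" else "))")])
termination_by (functions.length - j).toNat
decreasing_by have := pv_lt_of_pyGet?_some h; omega

def buildMain_alt (functions : List (List String)) (i : Int) : String :=
  let ps := pvLoop functions i [] []
  let base := if functions.length = 1 then "t" else "t)"
  pvJoin ps.1 ++ base ++ pvJoin ps.2.reverse

-- ===== PRECONDITION & SPEC =====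
-- Pre_: the scan from i reaches an entry whose first element is 'main', every entry
-- visited before it being non-empty — exactly the inputs on which A returns (otherwise
-- Python raises IndexError). The bound k < 2*len+1 is no restriction (any such scan
-- distance is ≤ 2*len); it only makes the condition decidable.
def Pre_buildMain (functions : List (List String)) (i : Int) : Prop :=
  ∃ k : Nat, k < 2 * functions.length + 1 ∧
    ((PySem.List.pyGet? functions (i + k)).bind (fun row => PySem.List.pyGet? row 0)) = some "main" ∧
    ∀ m : Nat, m < k →
      ((PySem.List.pyGet? functions (i + m)).bind (fun row => PySem.List.pyGet? row 0)).isSome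
instance (functions : List (List String)) (i : Int) : Decidable (Pre_buildMain functions i) := by
  unfold Pre_buildMain; infer_instance

def pvWitness_buildMain : List (List String) × Int := ([["f", "x"], ["main"]], 0)

def Spec_buildMain (functions : List (List String)) (i : Int) (out : String) : Prop :=
  out = buildMain_alt functions i
instance (functions : List (List String)) (i : Int) (out : String) :
    Decidable (Spec_buildMain functions i out) := by unfold Spec_buildMain; infer_instance

-- ===== CLAIM (what is proved, stated in full; the proofs are below) =====
def Claim_equal_buildMain : Prop := ∀ (functions : List (List String)) (i : Int),
  Dom_buildMain functions i → Pre_buildMain functions i →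
  Spec_buildMain functions i (buildMain functions i)

-- ===== LEMMAS AND PROOFS =====

-- unfolding equations for the two ports (the named match binder blocks simp, so prove them once with split)
theorem buildMain_main {f : List (List String)} {i : Int} {row : List String}
    (h : PySem.List.pyGet? f i = some row) (h0 : PySem.List.pyGet? row 0 = some "main") :
    buildMain f i = if f.length ≠ 1 then "t)" else "t" := by
  rw [buildMain]
  split
  · simp_all
  next row' heq =>
    rw [h] at heq; injection heq with he; subst he
    simp [h0]

theorem buildMain_step {f : List (List String)} {i : Int} {row : List String} {v : String}
    (h : PySem.List.pyGet? f i = some row) (h0 : PySem.List.pyGet? row 0 = some v)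
    (hm : v ≠ "main") :
    buildMain f i = "AP(LM(x" ++ PySem.Int.toStr (i + 1) ++ "," ++ buildMain f (i + 1) ++ ",t" ++
      PySem.Int.toStr (i + 1) ++ (if i = 0 then ")" else "))") := by
  rw [buildMain]
  split
  · simp_all
  next row' heq =>
    rw [h] at heq; injection heq with he; subst he
    simp [h0, hm]

theorem pvLoop_main {f : List (List String)} {j : Int} {pre suf : List String} {row : List String}
    (h : PySem.List.pyGet? f j = some row) (h0 : PySem.List.pyGet? row 0 = some "main") :
    pvLoop f j pre suf = (pre, suf) := by
  rw [pvLoop]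
  split
  · rfl
  next row' heq =>
    rw [h] at heq; injection heq with he; subst he
    simp [h0]

theorem pvLoop_step {f : List (List String)} {j : Int} {pre suf : List String} {row : List String}
    {v : String} (h : PySem.List.pyGet? f j = some row) (h0 : PySem.List.pyGet? row 0 = some v)
    (hm : v ≠ "main") :
    pvLoop f j pre suf = pvLoop f (j + 1)
      (pre ++ ["AP(LM(x" ++ PySem.Int.toStr (j + 1) ++ ","])
      (suf ++ [",t" ++ PySem.Int.toStr (j + 1) ++ (if j = 0 then ")" else "))")]) := by
  rw [pvLoop]
  split
  · simp_all
  next row' heq =>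
    rw [h] at heq; injection heq with he; subst he
    simp [h0, hm]

theorem pvJoin_concat (l : List String) (x : String) : pvJoin (l ++ [x]) = pvJoin l ++ x := by
  simp [pvJoin, List.foldl_append]

theorem pvFoldl_append_shift (l : List String) (a : String) :
    l.foldl (· ++ ·) a = a ++ l.foldl (· ++ ·) "" := by
  induction l generalizing a with
  | nil => simp
  | cons x xs ih =>
    simp only [List.foldl_cons]
    rw [ih (a ++ x), ih ("" ++ x)]
    simp [String.append_assoc]

theorem pvJoin_cons (x : String) (l : List String) : pvJoin (x :: l) = x ++ pvJoin l := by
  simp only [pvJoin, List.foldl_cons]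
  rw [pvFoldl_append_shift]
  simp

-- Main invariant: under the Pre_ scan condition (main reachable after k steps, all
-- earlier entries non-empty), assembling B's accumulators equals wrapping A's result.
theorem pv_key (k : Nat) : ∀ (f : List (List String)) (i : Int) (pre suf : List String),
    ((PySem.List.pyGet? f (i + k)).bind (fun row => PySem.List.pyGet? row 0)) = some "main" →
    (∀ m : Nat, m < k →
      ((PySem.List.pyGet? f (i + m)).bind (fun row => PySem.List.pyGet? row 0)).isSome) →
    pvJoin (pvLoop f i pre suf).1 ++ (if f.length = 1 then "t" else "t)") ++
      pvJoin (pvLoop f i pre suf).2.reverse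
    = pvJoin pre ++ buildMain f i ++ pvJoin suf.reverse := by
  induction k with
  | zero =>
    intro f i pre suf hmain _
    simp only [Int.natCast_zero, Int.add_zero] at hmain
    obtain ⟨row, hrow, h0⟩ := Option.bind_eq_some_iff.mp hmain
    rw [pvLoop_main hrow h0, buildMain_main hrow h0]
    by_cases hl : f.length = 1 <;> simp [hl]
  | succ k ih =>
    intro f i pre suf hmain hall
    have h0s := hall 0 (Nat.succ_pos k)
    simp only [Int.natCast_zero, Int.add_zero] at h0s
    obtain ⟨v, hv⟩ := Option.isSome_iff_exists.mp h0s
    obtain ⟨row, hrow, h0⟩ := Option.bind_eq_some_iff.mp hv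
    by_cases hm : v = "main"
    · subst hm
      rw [pvLoop_main hrow h0, buildMain_main hrow h0]
      by_cases hl : f.length = 1 <;> simp [hl]
    · have hmain' : ((PySem.List.pyGet? f (i + 1 + k)).bind
          (fun row => PySem.List.pyGet? row 0)) = some "main" := by
        have : i + 1 + (k : Int) = i + ((k + 1 : Nat) : Int) := by push_cast; ring
        rw [this]; exact hmain
      have hall' : ∀ m : Nat, m < k →
          ((PySem.List.pyGet? f (i + 1 + m)).bind (fun row => PySem.List.pyGet? row 0)).isSome := by
        intro m hmk
        have : i + 1 + (m : Int) = i + ((m + 1 : Nat) : Int) := by push_cast; ring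
        rw [this]; exact hall (m + 1) (by omega)
      have hstep := ih f (i + 1)
        (pre ++ ["AP(LM(x" ++ PySem.Int.toStr (i + 1) ++ ","])
        (suf ++ [",t" ++ PySem.Int.toStr (i + 1) ++ (if i = 0 then ")" else "))")])
        hmain' hall'
      rw [pvLoop_step hrow h0 hm, buildMain_step hrow h0 hm, hstep, pvJoin_concat]
      rw [List.reverse_append]
      simp only [List.reverse_cons, List.reverse_nil, List.nil_append, List.singleton_append]
      rw [pvJoin_cons]
      simp [String.append_assoc]

-- ===== VERDICT (by name: the statement is the Claim_ definition above) =====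
theorem buildMain_spec : Claim_equal_buildMain := by
  intro f i _ hpre
  obtain ⟨k, _, hmain, hall⟩ := hpre
  unfold Spec_buildMain buildMain_alt
  have h := pv_key k f i [] [] hmain hall
  simp only [pvJoin, List.foldl_nil, List.reverse_nil] at h ⊢
  simp only [String.empty_append, String.append_empty] at h
  exact h.symm
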